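-- pv_equiv track=rewrite | github.com/anishyadav893/AlgoDaily | targets-and-vicinities.py | getTV
-- ===== SOURCE A (Python) =====
-- def getTV(actual, guess):
--     actual = str(actual)
--     guess = str(guess)
--
--     target = 0
--     vicinity = 0
--
--     num = [0] * 10
--
--     for i in range(len(str(guess))):
--         if actual[i] == guess[i]:
--             target += 1
--         else:
--             if num[int(actual[i])] < 0:
--                 vicinity += 1
--             if num[int(guess[i])] > 0:
--                 vicinity += 1
--             num[int(actual[i])] += 1
--             num[int(guess[i])] -= 1
--     return "{}T{}V".format(target, vicinity)
-- ===== SOURCE B (Python) =====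
-- def getTV(actual, guess):
--     a, g = str(actual), str(guess)
--     pairs = [(int(a[i]), int(g[i])) for i in range(len(g)) if a[i] != g[i]]
--     target = len(g) - len(pairs)
--     au = [p[0] for p in pairs]
--     gu = [p[1] for p in pairs]
--     vicinity = sum(min(au.count(d), gu.count(d)) for d in range(10))
--     return "{}T{}V".format(target, vicinity)
-- ===== Notes on version B (the rewrite author's own statement) =====
-- stated objective: simpler
-- what changed: B replaces A's online signed-counter array (num[d] with <0/>0 tests updated in the same pass) by first collecting the digit pairs at unmatched positions and then computing the vicinity as a closed-form sum of per-digit min(count,count), with the target obtained by subtraction.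
import Mathlib
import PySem

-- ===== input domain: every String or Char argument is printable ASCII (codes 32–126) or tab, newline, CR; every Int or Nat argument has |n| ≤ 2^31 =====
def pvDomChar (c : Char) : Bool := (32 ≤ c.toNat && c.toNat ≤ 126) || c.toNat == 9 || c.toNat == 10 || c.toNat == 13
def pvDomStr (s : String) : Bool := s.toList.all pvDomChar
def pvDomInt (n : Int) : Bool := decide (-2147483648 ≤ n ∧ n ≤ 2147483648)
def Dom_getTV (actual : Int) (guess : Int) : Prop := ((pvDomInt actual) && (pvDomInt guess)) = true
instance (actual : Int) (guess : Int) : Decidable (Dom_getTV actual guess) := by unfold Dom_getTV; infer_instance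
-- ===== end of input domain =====

-- B computes the vicinity as a closed-form per-digit min-of-counts over the unmatched digit
-- pairs instead of A's online signed counter array: simpler, same O(n) cost.

-- ===== PORT A =====

-- int(c) for a single character; exact when c is a decimal digit (guaranteed by Pre_ at every
-- position where it is evaluated).
def pvDig (c : Char) : Int := (c.toNat : Int) - 48

-- loop body of A; state = (target, vicinity, num).  a.getD i ' ' is actual[i], exact for
-- i < a.length (Pre_ guarantees; out of range = IndexError, excluded by Pre_).
def getTVstep (a g : List Char) (s : Int × Int × List Int) (i : Nat) : Int × Int × List Int :=
  let ca := a.getD i ' '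
  let cg := g.getD i ' '
  if ca = cg then
    (s.1 + 1, s.2.1, s.2.2)
  else
    -- list indices int(actual[i]), int(guess[i]); in 0..9 under Pre_
    let na := (pvDig ca).toNat
    let ng := (pvDig cg).toNat
    let num := s.2.2
    let v := s.2.1 + (if num.getD na 0 < 0 then 1 else 0) + (if num.getD ng 0 > 0 then 1 else 0)
    let num1 := num.set na (num.getD na 0 + 1)
    let num2 := num1.set ng (num1.getD ng 0 - 1)
    (s.1, v, num2)

def getTV (actual : Int) (guess : Int) : String :=
  let a := PySem.Int.toChars actual
  let g := PySem.Int.toChars guess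
  let s := (List.range g.length).foldl (getTVstep a g) (0, 0, List.replicate 10 (0 : Int))
  String.ofList (PySem.Int.toChars s.1 ++ ['T'] ++ PySem.Int.toChars s.2.1 ++ ['V'])

-- ===== PORT B =====

def getTV_alt (actual : Int) (guess : Int) : String :=
  let a := PySem.Int.toChars actual
  let g := PySem.Int.toChars guess
  let pairs := (List.range g.length).filterMap (fun i =>
      if a.getD i ' ' = g.getD i ' ' then none
      else some (pvDig (a.getD i ' '), pvDig (g.getD i ' ')))
  let target : Int := (g.length : Int) - pairs.length
  let au := pairs.map Prod.fst
  let gu := pairs.map Prod.snd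
  let vicinity : Int :=
    (((List.range 10).map (fun (d : Nat) => min (au.count ((d : Int))) (gu.count ((d : Int))))).sum : Nat)
  String.ofList (PySem.Int.toChars target ++ ['T'] ++ PySem.Int.toChars vicinity ++ ['V'])

-- ===== PRECONDITION & SPEC =====
-- Pre_ holds exactly where A returns: A raises IndexError when str(actual) is shorter than
-- str(guess), and ValueError when some unmatched position holds a non-digit ('-' of a negative).
def Pre_getTV (actual : Int) (guess : Int) : Prop :=
  (PySem.Int.toChars guess).length ≤ (PySem.Int.toChars actual).length ∧
  ∀ i < (PySem.Int.toChars guess).length,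
    (PySem.Int.toChars actual).getD i ' ' ≠ (PySem.Int.toChars guess).getD i ' ' →
      ((PySem.Int.toChars actual).getD i ' ').isDigit = true ∧
      ((PySem.Int.toChars guess).getD i ' ').isDigit = true
instance (actual : Int) (guess : Int) : Decidable (Pre_getTV actual guess) := by
  unfold Pre_getTV; infer_instance
def pvWitness_getTV : Int × Int := (5312, 5321)

def Spec_getTV (actual : Int) (guess : Int) (out : String) : Prop := out = getTV_alt actual guess
instance (actual : Int) (guess : Int) (out : String) : Decidable (Spec_getTV actual guess out) := by unfold Spec_getTV; infer_instance

-- ===== CLAIM (what is proved, stated in full; the proofs are below) =====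
def Claim_equal_getTV : Prop := ∀ (actual : Int) (guess : Int), Dom_getTV actual guess → Pre_getTV actual guess → Spec_getTV actual guess (getTV actual guess)

-- ===== LEMMAS AND PROOFS =====

-- the selection Source B's comprehension makes at index i (proof-side name for the lambda in getTV_alt)
def pvSel (a g : List Char) (i : Nat) : Option (Int × Int) :=
  if a.getD i ' ' = g.getD i ' ' then none
  else some (pvDig (a.getD i ' '), pvDig (g.getD i ' '))

def pvPairs (a g : List Char) (n : Nat) : List (Int × Int) :=
  (List.range n).filterMap (pvSel a g)

def pvVic (P : List (Int × Int)) : Nat :=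
  ((List.range 10).map (fun (d : Nat) =>
    min ((P.map Prod.fst).count ((d : Int))) ((P.map Prod.snd).count ((d : Int))))).sum

theorem sum_range_bump (N na ng ba bg : Nat) (f f' : Nat → Nat)
    (hf : ∀ d, f' d = f d + (if d = na then ba else 0) + (if d = ng then bg else 0)) :
    ((List.range N).map f').sum
      = ((List.range N).map f).sum + (if na < N then ba else 0) + (if ng < N then bg else 0) := by
  induction N with
  | zero => simp
  | succ n ih =>
      simp only [List.range_succ, List.map_append, List.sum_append, List.map_cons,
        List.map_nil, List.sum_cons, List.sum_nil, ih, hf n]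
      split_ifs <;> omega

theorem pvDigit_bounds (c : Char) (h : c.isDigit = true) : 48 ≤ c.toNat ∧ c.toNat ≤ 57 := by
  simp [Char.isDigit] at h
  exact ⟨h.1, h.2⟩

theorem pvChar_toNat_inj (c d : Char) (h : c.toNat = d.toNat) : c = d := by
  apply Char.ext
  exact UInt32.toNat_inj.mp h

theorem pvGetD_set_ne (l : List Int) {i j : Nat} (x : Int) (h : i ≠ j) :
    (l.set i x).getD j 0 = l.getD j 0 := by
  simp [List.getD, h]

theorem pvGetD_set_eq (l : List Int) {i : Nat} (x : Int) (h : i < l.length) :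
    (l.set i x).getD i 0 = x := by
  simp [List.getD, h]

theorem pvCount_append (au : List Int) (da d : Int) :
    (au ++ [da]).count d = au.count d + (if d = da then 1 else 0) := by
  simp [List.count_append]
  split_ifs with h <;> simp [List.count_singleton, h]
  omega

-- the invariant of A's loop, phrased against B's pair list
theorem getTV_inv (a g : List Char) (n : Nat)
    (H : ∀ i < n, a.getD i ' ' ≠ g.getD i ' ' →
        (a.getD i ' ').isDigit = true ∧ (g.getD i ' ').isDigit = true) :
    ((List.range n).foldl (getTVstep a g) (0, 0, List.replicate 10 (0 : Int))).1
        = (n : Int) - (pvPairs a g n).length ∧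
    ((List.range n).foldl (getTVstep a g) (0, 0, List.replicate 10 (0 : Int))).2.1
        = (pvVic (pvPairs a g n) : Int) ∧
    ((List.range n).foldl (getTVstep a g) (0, 0, List.replicate 10 (0 : Int))).2.2.length = 10 ∧
    ∀ d : Nat, d < 10 →
      ((List.range n).foldl (getTVstep a g) (0, 0, List.replicate 10 (0 : Int))).2.2.getD d 0
        = (((pvPairs a g n).map Prod.fst).count (d : Int) : Int)
          - (((pvPairs a g n).map Prod.snd).count (d : Int) : Int) := by
  induction n with
  | zero =>
      refine ⟨by simp [pvPairs], by simp [pvPairs, pvVic], by simp, ?_⟩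
      intro d hd
      simp only [List.range_zero, List.foldl_nil, pvPairs, List.filterMap_nil, List.map_nil,
        List.count_nil]
      interval_cases d <;> rfl
  | succ n ih =>
      obtain ⟨h1, h2, h3, h4⟩ := ih (fun i hi hne => H i (by omega) hne)
      have hpair : pvPairs a g (n + 1) = pvPairs a g n ++ (pvSel a g n).toList := by
        simp only [pvPairs, List.range_succ, List.filterMap_append]
        cases h : pvSel a g n <;> simp [h]
      simp only [List.range_succ, List.foldl_append, List.foldl_cons, List.foldl_nil]
      by_cases hc : a.getD n ' ' = g.getD n ' '
      · have hsel : pvSel a g n = none := by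
          unfold pvSel; rw [if_pos hc]
        rw [hpair, hsel]
        simp only [getTVstep]
        rw [if_pos hc]
        simp only [Option.toList_none, List.append_nil]
        refine ⟨?_, h2, h3, h4⟩
        rw [h1]; push_cast; ring
      · obtain ⟨hda, hdg⟩ := H n (by omega) hc
        obtain ⟨ha1, ha2⟩ := pvDigit_bounds _ hda
        obtain ⟨hg1, hg2⟩ := pvDigit_bounds _ hdg
        have hsel : pvSel a g n = some (pvDig (a.getD n ' '), pvDig (g.getD n ' ')) := by
          unfold pvSel; rw [if_neg hc]
        have hna : (pvDig (a.getD n ' ')).toNat = (a.getD n ' ').toNat - 48 := by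
          unfold pvDig; omega
        have hng : (pvDig (g.getD n ' ')).toNat = (g.getD n ' ').toNat - 48 := by
          unfold pvDig; omega
        have hdacast : pvDig (a.getD n ' ') = (((a.getD n ' ').toNat - 48 : Nat) : Int) := by
          unfold pvDig; omega
        have hdgcast : pvDig (g.getD n ' ') = (((g.getD n ' ').toNat - 48 : Nat) : Int) := by
          unfold pvDig; omega
        set na := (a.getD n ' ').toNat - 48 with hna'
        set ng := (g.getD n ' ').toNat - 48 with hng'
        have hne : na ≠ ng := by
          intro he
          exact hc (pvChar_toNat_inj _ _ (by omega))
        have hna10 : na < 10 := by omega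
        have hng10 : ng < 10 := by omega
        rw [hpair, hsel]
        simp only [getTVstep]
        rw [if_neg hc]
        simp only [Option.toList_some, hna, hng, hdacast, hdgcast, Int.toNat_natCast]
        -- abbreviation for the old pair list
        set P := pvPairs a g n with hP
        have hmapf : (P ++ [((na : Int), (ng : Int))]).map Prod.fst = P.map Prod.fst ++ [(na : Int)] := by
          simp
        have hmaps : (P ++ [((na : Int), (ng : Int))]).map Prod.snd = P.map Prod.snd ++ [(ng : Int)] := by
          simp
        have hlen1 : ((((List.range n).foldl (getTVstep a g)
            (0, 0, List.replicate 10 (0 : Int))).2.2).set na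
              ((((List.range n).foldl (getTVstep a g) (0, 0, List.replicate 10 (0 : Int))).2.2).getD na 0 + 1)).length = 10 := by
          rw [List.length_set, h3]
        refine ⟨?_, ?_, ?_, ?_⟩
        · simp only [List.length_append, List.length_cons, List.length_nil]
          rw [h1]; push_cast; ring
        · -- vicinity component
          have hf : ∀ d, (fun (d : Nat) => min (((P.map Prod.fst ++ [(na : Int)]).count ((d : Int))))
                          (((P.map Prod.snd ++ [(ng : Int)]).count ((d : Int))))) d
              = (fun (d : Nat) => min ((P.map Prod.fst).count ((d : Int))) ((P.map Prod.snd).count ((d : Int)))) d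
                + (if d = na then (if (P.map Prod.fst).count ((na : Int)) < (P.map Prod.snd).count ((na : Int)) then 1 else 0) else 0)
                + (if d = ng then (if (P.map Prod.snd).count ((ng : Int)) < (P.map Prod.fst).count ((ng : Int)) then 1 else 0) else 0) := by
            intro d
            simp only [pvCount_append, Nat.cast_inj]
            by_cases hd1 : d = na <;> by_cases hd2 : d = ng <;>
              simp [hd1, hd2, hne, Ne.symm hne] <;> split_ifs <;> omega
          have hbump := sum_range_bump 10 na ng
            (if (P.map Prod.fst).count ((na : Int)) < (P.map Prod.snd).count ((na : Int)) then 1 else 0)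
            (if (P.map Prod.snd).count ((ng : Int)) < (P.map Prod.fst).count ((ng : Int)) then 1 else 0)
            (fun (d : Nat) => min ((P.map Prod.fst).count ((d : Int))) ((P.map Prod.snd).count ((d : Int))))
            (fun (d : Nat) => min (((P.map Prod.fst ++ [(na : Int)]).count ((d : Int))))
                          (((P.map Prod.snd ++ [(ng : Int)]).count ((d : Int))))) hf
          have hv : pvVic (P ++ [((na : Int), (ng : Int))])
              = pvVic P
                + (if (P.map Prod.fst).count ((na : Int)) < (P.map Prod.snd).count ((na : Int)) then 1 else 0)
                + (if (P.map Prod.snd).count ((ng : Int)) < (P.map Prod.fst).count ((ng : Int)) then 1 else 0) := by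
            simp only [pvVic, hmapf, hmaps]
            rw [hbump]
            simp [hna10, hng10]
          rw [h2, h4 na hna10, h4 ng hng10, hv]
          push_cast
          split_ifs <;> omega
        · simp only [List.length_set]; exact h3
        · intro d hd
          have h4d := h4 d hd
          have h4dn := h4 ng hng10
          simp only [hmapf, hmaps, pvCount_append, Nat.cast_inj]
          by_cases hd1 : d = ng
          · rw [hd1, pvGetD_set_eq _ _ (by rw [hlen1]; omega),
              pvGetD_set_ne _ _ hne, h4dn]
            simp [Ne.symm hne, hd1]
            ring
          · rw [pvGetD_set_ne _ _ (fun he => hd1 he.symm)]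
            by_cases hd2 : d = na
            · rw [hd2, pvGetD_set_eq _ _ (by rw [h3]; omega), h4 na hna10]
              simp [hd2, hne]
              ring
            · rw [pvGetD_set_ne _ _ (fun he => hd2 he.symm), h4d]
              simp [hd1, hd2]

-- ===== VERDICT (by name: the statement is the Claim_ definition above) =====
theorem getTV_spec : Claim_equal_getTV := by
  unfold Claim_equal_getTV
  intro actual guess _ hpre
  unfold Pre_getTV at hpre
  obtain ⟨hlen, H⟩ := hpre
  obtain ⟨h1, h2, -, -⟩ := getTV_inv (PySem.Int.toChars actual) (PySem.Int.toChars guess)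
    (PySem.Int.toChars guess).length H
  unfold Spec_getTV
  simp only [getTV, getTV_alt]
  rw [h1, h2]
  rfl
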